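-- pv_equiv track=rewrite | github.com/20000607-lxc/GPT_NER | ner_metrics.py | get_all_label_from_entities
-- ===== SOURCE A (Python) =====
-- def getmaxstr(str1, str2):
--     lstr1 = len(str1)
--     lstr2 = len(str2)
--     record = [[0 for i in range(lstr2+1)] for j in range(lstr1+1)]
--     maxNum = 0
--     p = 0
--     for i in range(lstr1):
--         for j in range(lstr2):
--             if str1[i] == str2[j]:
--                 record[i+1][j+1] = record[i][j]+1
--                 if record[i+1][j+1] > maxNum:
--                     maxNum = record[i+1][j+1]
--                     p = i+1
--     return p-maxNum, p-1
--
-- def allign_words(words, english):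
--     if english:
--         new_words = []
--         for j in range(len(words)):
--             if words[j] != '':
--                 if '\'s' not in words[j]:
--                     if ',' in words[j]:
--
--                         new_words.append(words[j].strip(','))
--                         new_words.append(',')
--                     elif '\'' in words[j]:
--
--                         split_word = words[j].split('\'')
--                         new_words.append(split_word[0])
--                         new_words.append('\'')
--                         new_words.append(split_word[1])
--                     else:
--                         new_words.append(words[j])
--                 else:
--                     new_words.append(words[j].strip('\'s'))
--                     new_words.append('\'s')
--     else:
--         new_words = words
--     return new_words
--
-- def get_all_label_from_entities(english, all_entities, input_words, word2label, this_is_label):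
--     """
--     entities = [person Trump, location USA*England, organization EU]
--     """
--     true_labels = ['O'] * len(input_words)
--     new_input_words = [input_words[i] for i in range(len(input_words))]
--
--     for i in range(len(all_entities)):
--         all_entities[i] = all_entities[i].split(' ')# location,  USA*England
--         if this_is_label:
--             assert all_entities[i][0] == ''
--
--         if len(all_entities[i]) <= 2:
--             continue
--         entity_type = all_entities[i][1]
--         entities = ' '.join(all_entities[i][2:])
--
--         entities = entities.split('*')# USA, England
--         if entities != [''] and entity_type in word2label.keys():
--             for j in range(len(entities)):
--                 entity_j = entities[j].split(' ')
--                 entity_j = allign_words(entity_j, english)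
--                 start, end = getmaxstr(new_input_words, entity_j)
--                 if start == end:
--                     true_labels[start] = 'B-' + word2label[entity_type]
--                 elif end == -1:# 没有共同的字符
--                     continue
--                 else:
--                     true_labels[start] = 'B-' + word2label[entity_type]
--                     true_labels[start+1:end+1] = [word2label[entity_type]]*(end-start)
--                 new_input_words[start:end+1] = ['[UNK]']*(end-start+1)
--     return true_labels
-- ===== SOURCE B (Python) =====
-- # B: same labelling task, but the longest-common-substring search drops the DP table
-- # (backward extension per cell, O(1) extra space), word alignment becomes a per-word
-- # flatMap, and the entity loop does not mutate all_entities (A's in-place split of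
-- # all_entities is caller-visible; equivalence here is about the return value only).
--
-- def _lcs_span(words, entity):
--     # earliest longest common contiguous run; (start, end), end == -1 when none
--     best, p = 0, 0
--     for i in range(len(words)):
--         for j in range(len(entity)):
--             ii, jj, run = i, j, 0
--             while ii >= 0 and jj >= 0 and words[ii] == entity[jj]:
--                 run += 1
--                 ii -= 1
--                 jj -= 1
--             if run > best:
--                 best, p = run, i + 1
--     return p - best, p - 1
--
-- def _align_one(word):
--     if word == '':
--         return []
--     if "'s" in word:
--         return [word.strip("'s"), "'s"]
--     if ',' in word:
--         return [word.strip(','), ',']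
--     if "'" in word:
--         a = word.split("'")
--         return [a[0], "'", a[1]]
--     return [word]
--
-- def get_all_label_from_entities(english, all_entities, input_words, word2label, this_is_label):
--     labels = ['O'] * len(input_words)
--     words = list(input_words)
--     for raw in all_entities:
--         parts = raw.split(' ')
--         if this_is_label:
--             assert parts[0] == ''
--         if len(parts) <= 2:
--             continue
--         label = word2label.get(parts[1])
--         names = ' '.join(parts[2:]).split('*')
--         if names == [''] or label is None:
--             continue
--         for name in names:
--             ws = name.split(' ')
--             entity = [p for w in ws for p in _align_one(w)] if english else ws
--             start, end = _lcs_span(words, entity)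
--             if end == -1:
--                 continue
--             labels[start] = 'B-' + label
--             labels[start + 1:end + 1] = [label] * (end - start)
--             words[start:end + 1] = ['[UNK]'] * (end - start + 1)
--     return labels
-- ===== Notes on version B (the rewrite author's own statement) =====
-- stated objective: alternative
-- what changed: getmaxstr's (n+1)x(m+1) DP table is replaced by a per-cell backward-extension scan keeping only (best,end) in O(1) extra space, word alignment becomes a per-word flatMap instead of an index loop with an accumulator, and the entity loop iterates directly without mutating all_entities.
import Mathlib
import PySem

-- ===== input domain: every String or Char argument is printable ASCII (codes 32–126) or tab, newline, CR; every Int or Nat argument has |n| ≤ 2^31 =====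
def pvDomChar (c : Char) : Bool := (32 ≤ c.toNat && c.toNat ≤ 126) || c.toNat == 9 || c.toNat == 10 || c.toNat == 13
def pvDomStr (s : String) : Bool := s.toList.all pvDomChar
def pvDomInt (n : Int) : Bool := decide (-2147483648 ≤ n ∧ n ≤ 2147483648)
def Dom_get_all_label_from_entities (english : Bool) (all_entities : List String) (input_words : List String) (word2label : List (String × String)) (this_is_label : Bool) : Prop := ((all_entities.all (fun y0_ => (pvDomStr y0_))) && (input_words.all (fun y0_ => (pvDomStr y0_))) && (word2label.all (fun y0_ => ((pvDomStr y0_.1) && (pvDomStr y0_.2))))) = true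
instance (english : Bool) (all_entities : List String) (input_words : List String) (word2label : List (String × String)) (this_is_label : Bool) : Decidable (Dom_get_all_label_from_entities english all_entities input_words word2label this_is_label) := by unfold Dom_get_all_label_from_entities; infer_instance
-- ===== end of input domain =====

-- B replaces A's O(n·m)-space LCS DP table by a per-cell backward extension (O(1) extra
-- space) and a flatMap word alignment; A mutates all_entities in place (B does not) —
-- the equivalence proved here is about the RETURN value only.

-- shared small transliteration helpers (same Python constructs appear in both programs)
-- s.split(sep): sep is a non-empty literal at every call site, so split? is always `some`
def pvSplit (s sep : String) : List String := (PySem.Str.split? s sep).getD [s]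
-- xs[i] = v  (exact for 0 ≤ i < len xs, which holds at every reachable call site)
def pvSetIdx (xs : List String) (i : Int) (v : String) : List String := xs.set i.toNat v
-- xs[a:b] = repl  (exact for 0 ≤ a ≤ b, which holds at every reachable call site)
def pvSetSlice (xs : List String) (a b : Int) (repl : List String) : List String :=
  xs.take a.toNat ++ repl ++ xs.drop b.toNat

-- ===== PORT A =====
-- record[i+1][j+1] = v
def pvSetCell (rec : List (List Int)) (i j : Nat) (v : Int) : List (List Int) :=
  rec.set i ((rec.getD i []).set j v)

def getmaxstrA (str1 str2 : List String) : Int × Int :=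
  let lstr1 := str1.length
  let lstr2 := str2.length
  let record : List (List Int) :=
    (List.range (lstr1+1)).map (fun _ => (List.range (lstr2+1)).map (fun _ => (0:Int)))
  let fin := (List.range lstr1).foldl (fun st i =>
      (List.range lstr2).foldl (fun (st : List (List Int) × Int × Int) j =>
        if str1.getD i "" = str2.getD j "" then
          let v := (st.1.getD i []).getD j 0 + 1
          let rec' := pvSetCell st.1 (i+1) (j+1) v
          if v > st.2.1 then (rec', v, (i:Int)+1) else (rec', st.2.1, st.2.2)
        else st) st) (record, (0:Int), (0:Int))
  (fin.2.2 - fin.2.1, fin.2.2 - 1)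

def allign_wordsA (words : List String) (english : Bool) : List String :=
  if english then
    -- Python: for j in range(len(words)) … words[j]; folded over the elements (read-only)
    words.foldl (fun new_words w =>
      if w ≠ "" then
        if ¬ (PySem.Str.isIn "'s" w = true) then
          if PySem.Str.isIn "," w = true then
            (new_words ++ [PySem.Str.stripChars w ","]) ++ [","]
          else if PySem.Str.isIn "'" w = true then
            let split_word := pvSplit w "'"
            ((new_words ++ [split_word.getD 0 ""]) ++ ["'"]) ++ [split_word.getD 1 ""]
          else new_words ++ [w]
        else (new_words ++ [PySem.Str.stripChars w "'s"]) ++ ["'s"]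
      else new_words) []
  else words

def get_all_label_from_entities (english : Bool) (all_entities : List String) (input_words : List String) (word2label : List (String × String)) (this_is_label : Bool) : List String :=
  let true_labels := List.replicate input_words.length "O"
  let new_input_words := (List.range input_words.length).map (fun i => input_words.getD i "")
  -- Python iterates i over range(len(all_entities)), overwriting all_entities[i] with its
  -- split; the slot is never read again, so folding over the original elements is exact.
  -- `assert all_entities[i][0] == ''` (when this_is_label) raises outside Pre_, no value.
  let fin := all_entities.foldl (fun (st : List String × List String) ent =>
      let parts := pvSplit ent " "
      if parts.length ≤ 2 then st
      else
        let entity_type := parts.getD 1 ""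
        let entities := pvSplit (PySem.Str.join " " (parts.drop 2)) "*"
        if entities ≠ [""] ∧ entity_type ∈ word2label.map Prod.fst then
          entities.foldl (fun (st : List String × List String) ej =>
            let entity_j := allign_wordsA (pvSplit ej " ") english
            let se := getmaxstrA st.2 entity_j
            let lbl := (word2label.lookup entity_type).getD ""  -- word2label[entity_type]
            if se.1 = se.2 then
              (pvSetIdx st.1 se.1 ("B-" ++ lbl),
               pvSetSlice st.2 se.1 (se.2+1) (List.replicate (se.2 - se.1 + 1).toNat "[UNK]"))
            else if se.2 = -1 then st
            else
              let tl := pvSetIdx st.1 se.1 ("B-" ++ lbl)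
              let tl := pvSetSlice tl (se.1+1) (se.2+1) (List.replicate (se.2 - se.1).toNat lbl)
              (tl, pvSetSlice st.2 se.1 (se.2+1) (List.replicate (se.2 - se.1 + 1).toNat "[UNK]"))
          ) st
        else st) (true_labels, new_input_words)
  fin.1

-- ===== PORT B =====
-- the backward-extension while loop of _lcs_span
def pvExtLoop (str1 str2 : List String) (ii jj L : Int) : Int :=
  if h : 0 ≤ ii ∧ 0 ≤ jj ∧ str1.getD ii.toNat "" = str2.getD jj.toNat "" then
    pvExtLoop str1 str2 (ii-1) (jj-1) (L+1)
  else L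
termination_by (ii+1).toNat
decreasing_by omega

def lcsSpanB (words entity : List String) : Int × Int :=
  let fin := (List.range words.length).foldl (fun st (i : Nat) =>
      (List.range entity.length).foldl (fun (st : Int × Int) (j : Nat) =>
        let run := pvExtLoop words entity i j 0
        if run > st.1 then (run, (i:Int)+1) else st) st) ((0:Int), (0:Int))
  (fin.2 - fin.1, fin.2 - 1)

def alignOne (w : String) : List String :=
  if w = "" then []
  else if PySem.Str.isIn "'s" w = true then [PySem.Str.stripChars w "'s", "'s"]
  else if PySem.Str.isIn "," w = true then [PySem.Str.stripChars w ",", ","]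
  else if PySem.Str.isIn "'" w = true then
    let a := pvSplit w "'"
    [a.getD 0 "", "'", a.getD 1 ""]
  else [w]

def get_all_label_from_entities_alt (english : Bool) (all_entities : List String) (input_words : List String) (word2label : List (String × String)) (this_is_label : Bool) : List String :=
  let labels := List.replicate input_words.length "O"
  -- words = list(input_words): the copy is immaterial for a pure value
  let fin := all_entities.foldl (fun (st : List String × List String) raw =>
      let parts := pvSplit raw " "
      if parts.length ≤ 2 then st
      else
        let label? := word2label.lookup (parts.getD 1 "")  -- word2label.get(parts[1])
        let names := pvSplit (PySem.Str.join " " (parts.drop 2)) "*"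
        if names = [""] ∨ label? = none then st
        else
          let lbl := label?.getD ""
          names.foldl (fun (st : List String × List String) name =>
            let ws := pvSplit name " "
            let entity := if english then ws.flatMap alignOne else ws
            let se := lcsSpanB st.2 entity
            if se.2 = -1 then st
            else
              let tl := pvSetIdx st.1 se.1 ("B-" ++ lbl)
              let tl := pvSetSlice tl (se.1+1) (se.2+1) (List.replicate (se.2 - se.1).toNat lbl)
              (tl, pvSetSlice st.2 se.1 (se.2+1) (List.replicate (se.2 - se.1 + 1).toNat "[UNK]"))
          ) st) (labels, input_words)
  fin.1

-- ===== PRECONDITION & SPEC =====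
-- Pre_ excludes exactly the inputs where A's `assert all_entities[i][0] == ''` raises
-- AssertionError (this_is_label set and some entity neither empty nor starting with ' ').
def Pre_get_all_label_from_entities (english : Bool) (all_entities : List String) (input_words : List String) (word2label : List (String × String)) (this_is_label : Bool) : Prop :=
  this_is_label = true → ∀ e ∈ all_entities, e = "" ∨ PySem.Str.startswith e " " = true
instance (english : Bool) (all_entities : List String) (input_words : List String) (word2label : List (String × String)) (this_is_label : Bool) : Decidable (Pre_get_all_label_from_entities english all_entities input_words word2label this_is_label) := by unfold Pre_get_all_label_from_entities; infer_instance

def pvWitness_get_all_label_from_entities : Bool × List String × List String × (List (String × String)) × Bool :=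
  (false, [" location USA*England", "person Trump"], ["Trump", "visited", "USA"], [("location", "LOC"), ("person", "PER")], false)

def Spec_get_all_label_from_entities (english : Bool) (all_entities : List String) (input_words : List String) (word2label : List (String × String)) (this_is_label : Bool) (out : List String) : Prop := out = get_all_label_from_entities_alt english all_entities input_words word2label this_is_label
instance (english : Bool) (all_entities : List String) (input_words : List String) (word2label : List (String × String)) (this_is_label : Bool) (out : List String) : Decidable (Spec_get_all_label_from_entities english all_entities input_words word2label this_is_label out) := by unfold Spec_get_all_label_from_entities; infer_instance

-- ===== CLAIM (what is proved, stated in full; the proofs are below) =====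
def Claim_equal_get_all_label_from_entities : Prop := ∀ (english : Bool) (all_entities : List String) (input_words : List String) (word2label : List (String × String)) (this_is_label : Bool), Dom_get_all_label_from_entities english all_entities input_words word2label this_is_label → Pre_get_all_label_from_entities english all_entities input_words word2label this_is_label → Spec_get_all_label_from_entities english all_entities input_words word2label this_is_label (get_all_label_from_entities english all_entities input_words word2label this_is_label)

-- ===== LEMMAS AND PROOFS =====

theorem pvExtLoop_add (str1 str2 : List String) (ii jj L : Int) :
    pvExtLoop str1 str2 ii jj L = L + pvExtLoop str1 str2 ii jj 0 := by
  generalize hn : (ii+1).toNat = n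
  induction n using Nat.strong_induction_on generalizing ii jj L with
  | _ n ih =>
    by_cases h : 0 ≤ ii ∧ 0 ≤ jj ∧ str1.getD ii.toNat "" = str2.getD jj.toNat ""
    · conv_lhs => rw [pvExtLoop]
      conv_rhs => rw [pvExtLoop]
      rw [dif_pos h, dif_pos h, ih ((ii-1)+1).toNat (by omega) (ii-1) (jj-1) (L+1) rfl,
        ih ((ii-1)+1).toNat (by omega) (ii-1) (jj-1) (0+1) rfl]
      ring
    · conv_lhs => rw [pvExtLoop]
      conv_rhs => rw [pvExtLoop]
      rw [dif_neg h, dif_neg h]; ring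

theorem pvExtLoop_ge (str1 str2 : List String) (ii jj L : Int) :
    L ≤ pvExtLoop str1 str2 ii jj L := by
  generalize hn : (ii+1).toNat = n
  induction n using Nat.strong_induction_on generalizing ii jj L with
  | _ n ih =>
    rw [pvExtLoop]
    by_cases h : 0 ≤ ii ∧ 0 ≤ jj ∧ str1.getD ii.toNat "" = str2.getD jj.toNat ""
    · rw [dif_pos h]
      have := ih ((ii-1)+1).toNat (by omega) (ii-1) (jj-1) (L+1) rfl
      omega
    · rw [dif_neg h]

theorem pvExtLoop_le' (str1 str2 : List String) (ii jj L : Int) (hii : -1 ≤ ii) :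
    pvExtLoop str1 str2 ii jj L ≤ L + ii + 1 := by
  generalize hn : (ii+1).toNat = n
  induction n using Nat.strong_induction_on generalizing ii jj L with
  | _ n ih =>
    rw [pvExtLoop]
    by_cases h : 0 ≤ ii ∧ 0 ≤ jj ∧ str1.getD ii.toNat "" = str2.getD jj.toNat ""
    · rw [dif_pos h]
      have := ih ((ii-1)+1).toNat (by omega) (ii-1) (jj-1) (L+1) (by omega) rfl
      omega
    · rw [dif_neg h]; omega

def pvRun (str1 str2 : List String) (i j : Nat) : Int :=
  pvExtLoop str1 str2 (i:Int) (j:Int) 0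

def pvCellT (str1 str2 : List String) (r c : Nat) : Int :=
  if 1 ≤ r ∧ 1 ≤ c ∧ str1.getD (r-1) "" = str2.getD (c-1) "" then pvRun str1 str2 (r-1) (c-1) else 0

theorem pvRun_nonneg (str1 str2 : List String) (i j : Nat) : 0 ≤ pvRun str1 str2 i j := by
  simpa using pvExtLoop_ge str1 str2 (i:Int) (j:Int) 0

theorem pvRun_le (str1 str2 : List String) (i j : Nat) : pvRun str1 str2 i j ≤ (i:Int) + 1 := by
  simpa using pvExtLoop_le' str1 str2 (i:Int) (j:Int) 0 (by omega)

theorem pvCellT_nonneg (str1 str2 : List String) (r c : Nat) : 0 ≤ pvCellT str1 str2 r c := by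
  unfold pvCellT; split
  · exact pvRun_nonneg _ _ _ _
  · omega

theorem pvCellT_zero (str1 str2 : List String) (r c : Nat) (h : r = 0 ∨ c = 0) :
    pvCellT str1 str2 r c = 0 := by
  unfold pvCellT; rw [if_neg]; omega

theorem pvRun_eq_zero_of_not_match (str1 str2 : List String) (i j : Nat)
    (h : ¬ str1.getD i "" = str2.getD j "") :
    pvRun str1 str2 i j = 0 := by
  unfold pvRun
  rw [pvExtLoop, dif_neg]
  simp only [Int.toNat_natCast]
  intro hc
  exact h hc.2.2

theorem pvRun_eq_of_match (str1 str2 : List String) (i j : Nat)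
    (h : str1.getD i "" = str2.getD j "") :
    pvRun str1 str2 i j = pvCellT str1 str2 i j + 1 := by
  unfold pvRun
  rw [pvExtLoop, dif_pos (by simp only [Int.toNat_natCast]; exact ⟨by omega, by omega, h⟩)]
  rw [pvExtLoop_add]
  unfold pvCellT
  by_cases h1 : 1 ≤ i ∧ 1 ≤ j
  · have hi : (i:Int) - 1 = ((i-1 : Nat) : Int) := by omega
    have hj : (j:Int) - 1 = ((j-1 : Nat) : Int) := by omega
    rw [hi, hj]
    by_cases hm : str1.getD (i-1) "" = str2.getD (j-1) ""
    · rw [if_pos ⟨h1.1, h1.2, hm⟩]; unfold pvRun; ring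
    · have h0 := pvRun_eq_zero_of_not_match str1 str2 (i-1) (j-1) hm
      unfold pvRun at h0
      rw [if_neg (by tauto), h0]; ring
  · rw [if_neg (by tauto)]
    have : pvExtLoop str1 str2 ((i:Int)-1) ((j:Int)-1) 0 = 0 := by
      rw [pvExtLoop, dif_neg (by omega)]
    omega

def pvCell (rec : List (List Int)) (r c : Nat) : Int := (rec.getD r []).getD c 0

def pvContent (str1 str2 : List String) (i j r c : Nat) : Int :=
  if r ≤ i ∨ (r = i+1 ∧ c ≤ j) then pvCellT str1 str2 r c else 0

def pvMat (str1 str2 : List String) (rec : List (List Int)) (i j : Nat) : Prop :=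
  rec.length = str1.length + 1 ∧
  (∀ r, r ≤ str1.length → (rec.getD r []).length = str2.length + 1) ∧
  (∀ r c, r ≤ str1.length → c ≤ str2.length → pvCell rec r c = pvContent str1 str2 i j r c)

-- getD through set
theorem pv_getD_set {α : Type} (xs : List α) (i r : Nat) (v d : α) (hi : i < xs.length) :
    (xs.set i v).getD r d = if r = i then v else xs.getD r d := by
  by_cases h : r = i
  · subst h; simp [List.getD_eq_getElem?_getD, List.getElem?_set_self, hi]
  · simp [List.getD_eq_getElem?_getD, List.getElem?_set_ne (by omega : i ≠ r), h]

theorem pv_rowlen_setCell (rec : List (List Int)) (a b : Nat) (v : Int) (r : Nat)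
    (ha : a < rec.length) :
    ((pvSetCell rec a b v).getD r []).length = (rec.getD r []).length := by
  unfold pvSetCell
  rw [pv_getD_set _ _ _ _ _ ha]
  by_cases h : r = a
  · subst h; simp
  · simp [h]

theorem pv_cell_setCell (rec : List (List Int)) (a b : Nat) (v : Int) (r c : Nat)
    (ha : a < rec.length) (hb : b < (rec.getD a []).length) :
    pvCell (pvSetCell rec a b v) r c =
      if r = a ∧ c = b then v else pvCell rec r c := by
  unfold pvCell pvSetCell
  rw [pv_getD_set _ _ _ _ _ ha]
  by_cases h : r = a
  · subst h
    rw [if_pos rfl, pv_getD_set _ _ _ _ _ hb]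
    by_cases hc : c = b <;> simp [hc]
  · simp [h]

theorem pv_foldl_range_inv {σ : Type} (f : σ → Nat → σ) (n : Nat) (I : Nat → σ → Prop) (init : σ)
    (h0 : I 0 init) (hs : ∀ i s, i < n → I i s → I (i+1) (f s i)) :
    I n ((List.range n).foldl f init) := by
  induction n with
  | zero => simpa using h0
  | succ m ih =>
    rw [List.range_succ, List.foldl_append]
    exact hs m _ (Nat.lt_succ_self m) (ih (fun i s hi => hs i s (Nat.lt_succ_of_lt hi)))

def pvBStep (str1 str2 : List String) (i : Nat) (st : Int × Int) (j : Nat) : Int × Int :=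
  if pvRun str1 str2 i j > st.1 then (pvRun str1 str2 i j, (i:Int)+1) else st
def pvBOuter (str1 str2 : List String) (st : Int × Int) (i : Nat) : Int × Int :=
  (List.range str2.length).foldl (pvBStep str1 str2 i) st
def pvStInv (l1 : Nat) (st : Int × Int) : Prop :=
  (st.1 = 0 ∧ st.2 = 0) ∨ (1 ≤ st.1 ∧ st.1 ≤ st.2 ∧ st.2 ≤ (l1:Int))

theorem pvBStep_inv (str1 str2 : List String) (i : Nat) (hi : i < str1.length)
    (st : Int × Int) (j : Nat) (h : pvStInv str1.length st) :
    pvStInv str1.length (pvBStep str1 str2 i st j) := by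
  unfold pvBStep
  by_cases hr : pvRun str1 str2 i j > st.1
  · rw [if_pos hr]
    have h1 := pvRun_le str1 str2 i j
    unfold pvStInv at h ⊢
    right
    refine ⟨by simp; omega, by simp; omega, by simp; omega⟩
  · rw [if_neg hr]; exact h

theorem pvBfold_inv (str1 str2 : List String) (n : Nat) (hn : n ≤ str1.length) :
    pvStInv str1.length ((List.range n).foldl (pvBOuter str1 str2) (0, 0)) := by
  have := pv_foldl_range_inv (pvBOuter str1 str2) n (fun _ st => pvStInv str1.length st) (0,0)
    (by left; exact ⟨rfl, rfl⟩)
    (fun i st hi hst => by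
      unfold pvBOuter
      exact pv_foldl_range_inv (pvBStep str1 str2 i) str2.length (fun _ st => pvStInv str1.length st) st hst
        (fun j st' hj hst' => pvBStep_inv str1 str2 i (by omega) st' j hst'))
  exact this

def pvAInner (str1 str2 : List String) (i : Nat) (st : List (List Int) × Int × Int) (j : Nat) :
    List (List Int) × Int × Int :=
  if str1.getD i "" = str2.getD j "" then
    let v := (st.1.getD i []).getD j 0 + 1
    let rec' := pvSetCell st.1 (i+1) (j+1) v
    if v > st.2.1 then (rec', v, (i:Int)+1) else (rec', st.2.1, st.2.2)
  else st

-- one inner step preserves the coupled invariant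
theorem pv_inner_inv_step (str1 str2 : List String) (i : Nat) (hi : i < str1.length)
    (bst : Int × Int) (j : Nat) (hj : j < str2.length) (st : List (List Int) × Int × Int)
    (hM : pvMat str1 str2 st.1 i j)
    (hC : st.2 = (List.range j).foldl (pvBStep str1 str2 i) bst)
    (hS : pvStInv str1.length st.2) :
    pvMat str1 str2 (pvAInner str1 str2 i st j).1 i (j+1) ∧
    (pvAInner str1 str2 i st j).2 = (List.range (j+1)).foldl (pvBStep str1 str2 i) bst ∧
    pvStInv str1.length (pvAInner str1 str2 i st j).2 := by
  obtain ⟨hlen, hrow, hcells⟩ := hM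
  have hi1 : i + 1 < st.1.length := by omega
  have hrowi1 : (st.1.getD (i+1) []).length = str2.length + 1 := hrow (i+1) (by omega)
  have hj1 : j + 1 < (st.1.getD (i+1) []).length := by omega
  rw [List.range_succ, List.foldl_append, ← hC]
  unfold pvAInner pvBStep
  simp only [List.foldl_cons, List.foldl_nil]
  by_cases hm : str1.getD i "" = str2.getD j ""
  · simp only [if_pos hm]
    have hread : (st.1.getD i []).getD j 0 = pvCellT str1 str2 i j := by
      have := hcells i j (by omega) (by omega)
      unfold pvCell pvContent at this
      rw [this, if_pos (by omega)]
    have hv : (st.1.getD i []).getD j 0 + 1 = pvRun str1 str2 i j := by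
      rw [hread, pvRun_eq_of_match str1 str2 i j hm]
    have hmat : pvMat str1 str2 (pvSetCell st.1 (i+1) (j+1) ((st.1.getD i []).getD j 0 + 1)) i (j+1) := by
      refine ⟨by unfold pvSetCell; simp [hlen], ?_, ?_⟩
      · intro r hr
        rw [pv_rowlen_setCell _ _ _ _ _ hi1]
        exact hrow r hr
      · intro r c hr hc
        rw [pv_cell_setCell _ _ _ _ _ _ hi1 hj1]
        by_cases hrc : r = i+1 ∧ c = j+1
        · rw [if_pos hrc]
          obtain ⟨hr1, hc1⟩ := hrc; subst hr1; subst hc1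
          unfold pvContent
          rw [if_pos (by omega)]
          unfold pvCellT
          have hmm : str1.getD (i+1-1) "" = str2.getD (j+1-1) "" := by simpa using hm
          rw [if_pos ⟨by omega, by omega, hmm⟩]
          simpa using hv
        · rw [if_neg hrc, hcells r c hr hc]
          unfold pvContent
          by_cases h1 : r ≤ i ∨ (r = i+1 ∧ c ≤ j)
          · rw [if_pos h1, if_pos (by omega)]
          · rw [if_neg h1, if_neg (by omega)]
    by_cases hgt : (st.1.getD i []).getD j 0 + 1 > st.2.1
    · rw [if_pos hgt, if_pos (by rw [← hv]; exact hgt)]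
      have hrun1 : 1 ≤ pvRun str1 str2 i j := by
        rw [← hv]; have := pvCellT_nonneg str1 str2 i j; rw [hread]; omega
      rw [hv] at hmat ⊢
      refine ⟨hmat, rfl, ?_⟩
      have := pvRun_le str1 str2 i j
      right
      refine ⟨by simpa using hrun1, by simp; omega, by simp; omega⟩
    · rw [if_neg hgt, if_neg (by rw [← hv]; exact hgt)]
      exact ⟨hmat, by simp, hS⟩
  · simp only [if_neg hm]
    have hrun0 : pvRun str1 str2 i j = 0 := pvRun_eq_zero_of_not_match str1 str2 i j hm
    have hmx0 : ¬ pvRun str1 str2 i j > st.2.1 := by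
      unfold pvStInv at hS; omega
    rw [if_neg hmx0]
    refine ⟨⟨hlen, hrow, ?_⟩, rfl, hS⟩
    intro r c hr hc
    rw [hcells r c hr hc]
    unfold pvContent
    by_cases h1 : r ≤ i ∨ (r = i+1 ∧ c ≤ j)
    · rw [if_pos h1, if_pos (by omega)]
    · by_cases h2 : r = i+1 ∧ c = j+1
      · rw [if_neg h1, if_pos (by omega)]
        rw [pvCellT]
        rw [if_neg (by simp only [h2.1, h2.2, Nat.add_sub_cancel]; tauto)]
      · rw [if_neg h1, if_neg (by omega)]

theorem pvContent_roll (str1 str2 : List String) (i r c : Nat) (hc : c ≤ str2.length) :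
    pvContent str1 str2 i str2.length r c = pvContent str1 str2 (i+1) 0 r c := by
  unfold pvContent
  by_cases h1 : r ≤ i ∨ (r = i+1 ∧ c ≤ str2.length)
  · rw [if_pos h1, if_pos (by omega)]
  · by_cases h2 : r = i+2 ∧ c = 0
    · rw [if_neg h1, if_pos (by omega), pvCellT_zero _ _ _ _ (by omega)]
    · rw [if_neg h1, if_neg (by omega)]

def pvRec0 (str1 str2 : List String) : List (List Int) :=
  (List.range (str1.length+1)).map (fun _ => (List.range (str2.length+1)).map (fun _ => (0:Int)))

theorem pvRec0_mat (str1 str2 : List String) : pvMat str1 str2 (pvRec0 str1 str2) 0 0 := by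
  refine ⟨by simp [pvRec0], ?_, ?_⟩
  · intro r hr
    unfold pvRec0
    rw [List.getD_eq_getElem?_getD]
    simp [List.getElem?_map, List.getElem?_range, Nat.lt_succ_of_le hr]
  · intro r c hr hc
    have hz : pvCell (pvRec0 str1 str2) r c = 0 := by
      unfold pvCell pvRec0
      by_cases h1 : r < str1.length+1
      · by_cases h2 : c < str2.length+1 <;>
          simp [List.getD_eq_getElem?_getD, List.getElem?_map, List.getElem?_range, h1, h2]
      · simp [List.getD_eq_getElem?_getD, List.getElem?_map, List.getElem?_range, h1]
    rw [hz, pvContent]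
    by_cases h1 : r ≤ 0 ∨ (r = 1 ∧ c ≤ 0)
    · rw [if_pos h1, pvCellT_zero _ _ _ _ (by omega)]
    · rw [if_neg h1]

theorem pvAfold_inv (str1 str2 : List String) :
    (((List.range str1.length).foldl
        (fun st i => (List.range str2.length).foldl (pvAInner str1 str2 i) st)
        (pvRec0 str1 str2, (0:Int), (0:Int))).2 :
      Int × Int) = (List.range str1.length).foldl (pvBOuter str1 str2) (0, 0) := by
  have main := pv_foldl_range_inv
      (fun st i => (List.range str2.length).foldl (pvAInner str1 str2 i) st)
      str1.length
      (fun n st => pvMat str1 str2 st.1 n 0 ∧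
        st.2 = (List.range n).foldl (pvBOuter str1 str2) (0, 0) ∧
        pvStInv str1.length st.2)
      (pvRec0 str1 str2, 0, 0)
      ⟨pvRec0_mat str1 str2, rfl, Or.inl ⟨rfl, rfl⟩⟩
      (fun i st hi hst => by
        obtain ⟨hM, hC, hS⟩ := hst
        have inner := pv_foldl_range_inv (pvAInner str1 str2 i) str2.length
          (fun j st' => pvMat str1 str2 st'.1 i j ∧
            st'.2 = (List.range j).foldl (pvBStep str1 str2 i) st.2 ∧
            pvStInv str1.length st'.2)
          st ⟨hM, by simp, hS⟩
          (fun j st' hj hst' =>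
            pv_inner_inv_step str1 str2 i hi st.2 j hj st' hst'.1 hst'.2.1 hst'.2.2)
        refine ⟨?_, ?_, inner.2.2⟩
        · obtain ⟨h1, h2, h3⟩ := inner.1
          refine ⟨h1, h2, ?_⟩
          intro r c hr hc
          rw [h3 r c hr hc, pvContent_roll str1 str2 i r c hc]
        · rw [List.range_succ, List.foldl_append, ← hC]
          simp only [List.foldl_cons, List.foldl_nil]
          rw [inner.2.1]
          rfl)
  exact main.2.1


theorem lcsSpanB_eqfold (str1 str2 : List String) :
    lcsSpanB str1 str2 =
      ((((List.range str1.length).foldl (pvBOuter str1 str2) (0, 0)).2 -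
        ((List.range str1.length).foldl (pvBOuter str1 str2) (0, 0)).1),
       (((List.range str1.length).foldl (pvBOuter str1 str2) (0, 0)).2 - 1)) := by
  unfold lcsSpanB pvBOuter pvBStep pvRun
  rfl

theorem getmaxstrA_eq (str1 str2 : List String) : getmaxstrA str1 str2 = lcsSpanB str1 str2 := by
  have hA : getmaxstrA str1 str2 =
      ((((List.range str1.length).foldl
          (fun st i => (List.range str2.length).foldl (pvAInner str1 str2 i) st)
          (pvRec0 str1 str2, (0:Int), (0:Int))).2.2 -
        ((List.range str1.length).foldl
          (fun st i => (List.range str2.length).foldl (pvAInner str1 str2 i) st)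
          (pvRec0 str1 str2, (0:Int), (0:Int))).2.1),
       (((List.range str1.length).foldl
          (fun st i => (List.range str2.length).foldl (pvAInner str1 str2 i) st)
          (pvRec0 str1 str2, (0:Int), (0:Int))).2.2 - 1)) := rfl
  have hB := lcsSpanB_eqfold str1 str2
  rw [hA, hB, pvAfold_inv]

theorem lcsSpanB_cases (str1 str2 : List String) :
    lcsSpanB str1 str2 = (0, -1) ∨
      (0 ≤ (lcsSpanB str1 str2).1 ∧ (lcsSpanB str1 str2).1 ≤ (lcsSpanB str1 str2).2) := by
  have hB := lcsSpanB_eqfold str1 str2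
  have hS := pvBfold_inv str1 str2 str1.length (le_refl _)
  unfold pvStInv at hS
  rcases hS with ⟨h1, h2⟩ | ⟨h1, h2, h3⟩
  · left; rw [hB, h1, h2]; norm_num
  · right; rw [hB]; constructor <;> simp <;> omega

theorem allign_wordsA_true (words : List String) :
    allign_wordsA words true = words.flatMap alignOne := by
  unfold allign_wordsA
  rw [if_pos rfl]
  have hstep : (fun (new_words : List String) (w : String) =>
      if w ≠ "" then
        if ¬ (PySem.Str.isIn "'s" w = true) then
          if PySem.Str.isIn "," w = true then
            (new_words ++ [PySem.Str.stripChars w ","]) ++ [","]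
          else if PySem.Str.isIn "'" w = true then
            let split_word := pvSplit w "'"
            ((new_words ++ [split_word.getD 0 ""]) ++ ["'"]) ++ [split_word.getD 1 ""]
          else new_words ++ [w]
        else (new_words ++ [PySem.Str.stripChars w "'s"]) ++ ["'s"]
      else new_words) = (fun acc w => acc ++ alignOne w) := by
    funext acc w
    unfold alignOne
    split_ifs <;> simp_all
  rw [hstep, PySem.List.foldl_append_eq_flatMap]
  simp

theorem pv_new_input_words (xs : List String) :
    (List.range xs.length).map (fun i => xs.getD i "") = xs := by
  apply List.ext_getElem
  · simp
  · intro n h1 h2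
    simp only [List.getElem_map, List.getElem_range]
    rw [List.getD_eq_getElem?_getD, List.getElem?_eq_getElem h2]
    rfl

theorem pv_mem_keys_iff_lookup (k : String) (l : List (String × String)) :
    k ∈ l.map Prod.fst ↔ (l.lookup k).isSome := by
  induction l with
  | nil => simp
  | cons hd tl ih =>
    obtain ⟨a, b⟩ := hd
    by_cases h : k = a
    · subst h
      simp [List.lookup]
    · have hba : (k == a) = false := by simp [h]
      simp only [List.map_cons, List.mem_cons, List.lookup, hba, ih]
      tauto

theorem pv_inner_step_eq (english : Bool) (word2label : List (String × String))
    (entity_type : String) (st : List String × List String) (ej : String) :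
    (let entity_j := allign_wordsA (pvSplit ej " ") english
     let se := getmaxstrA st.2 entity_j
     let lbl := (word2label.lookup entity_type).getD ""
     if se.1 = se.2 then
       (pvSetIdx st.1 se.1 ("B-" ++ lbl),
        pvSetSlice st.2 se.1 (se.2+1) (List.replicate (se.2 - se.1 + 1).toNat "[UNK]"))
     else if se.2 = -1 then st
     else
       let tl := pvSetIdx st.1 se.1 ("B-" ++ lbl)
       let tl := pvSetSlice tl (se.1+1) (se.2+1) (List.replicate (se.2 - se.1).toNat lbl)
       (tl, pvSetSlice st.2 se.1 (se.2+1) (List.replicate (se.2 - se.1 + 1).toNat "[UNK]"))) =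
    (let ws := pvSplit ej " "
     let entity := if english then ws.flatMap alignOne else ws
     let se := lcsSpanB st.2 entity
     let lbl := (word2label.lookup entity_type).getD ""
     if se.2 = -1 then st
     else
       let tl := pvSetIdx st.1 se.1 ("B-" ++ lbl)
       let tl := pvSetSlice tl (se.1+1) (se.2+1) (List.replicate (se.2 - se.1).toNat lbl)
       (tl, pvSetSlice st.2 se.1 (se.2+1) (List.replicate (se.2 - se.1 + 1).toNat "[UNK]"))) := by
  have halign : allign_wordsA (pvSplit ej " ") english =
      (if english then (pvSplit ej " ").flatMap alignOne else pvSplit ej " ") := by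
    cases english
    · rfl
    · rw [allign_wordsA_true]; rfl
  simp only [halign, getmaxstrA_eq]
  set entity := (if english then (pvSplit ej " ").flatMap alignOne else pvSplit ej " ") with hent
  set se := lcsSpanB st.2 entity with hse
  rcases lcsSpanB_cases st.2 entity with h | ⟨h1, h2⟩
  · rw [← hse] at h
    rw [h]
    norm_num
  · rw [← hse] at h1 h2
    have hne : se.2 ≠ -1 := by omega
    by_cases heq : se.1 = se.2
    · rw [if_pos heq, if_neg hne]
      have hz : (se.2 - se.1).toNat = 0 := by omega
      rw [hz, heq]
      simp only [List.replicate_zero]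
      unfold pvSetSlice
      simp [List.take_append_drop]
    · rw [if_neg heq]

theorem pv_outer_step_eq (english : Bool) (word2label : List (String × String)) :
    (fun (st : List String × List String) ent =>
      let parts := pvSplit ent " "
      if parts.length ≤ 2 then st
      else
        let entity_type := parts.getD 1 ""
        let entities := pvSplit (PySem.Str.join " " (parts.drop 2)) "*"
        if entities ≠ [""] ∧ entity_type ∈ word2label.map Prod.fst then
          entities.foldl (fun (st : List String × List String) ej =>
            let entity_j := allign_wordsA (pvSplit ej " ") english
            let se := getmaxstrA st.2 entity_j
            let lbl := (word2label.lookup entity_type).getD ""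
            if se.1 = se.2 then
              (pvSetIdx st.1 se.1 ("B-" ++ lbl),
               pvSetSlice st.2 se.1 (se.2+1) (List.replicate (se.2 - se.1 + 1).toNat "[UNK]"))
            else if se.2 = -1 then st
            else
              let tl := pvSetIdx st.1 se.1 ("B-" ++ lbl)
              let tl := pvSetSlice tl (se.1+1) (se.2+1) (List.replicate (se.2 - se.1).toNat lbl)
              (tl, pvSetSlice st.2 se.1 (se.2+1) (List.replicate (se.2 - se.1 + 1).toNat "[UNK]"))
          ) st
        else st) =
    (fun (st : List String × List String) raw =>
      let parts := pvSplit raw " "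
      if parts.length ≤ 2 then st
      else
        let label? := word2label.lookup (parts.getD 1 "")
        let names := pvSplit (PySem.Str.join " " (parts.drop 2)) "*"
        if names = [""] ∨ label? = none then st
        else
          let lbl := label?.getD ""
          names.foldl (fun (st : List String × List String) name =>
            let ws := pvSplit name " "
            let entity := if english then ws.flatMap alignOne else ws
            let se := lcsSpanB st.2 entity
            if se.2 = -1 then st
            else
              let tl := pvSetIdx st.1 se.1 ("B-" ++ lbl)
              let tl := pvSetSlice tl (se.1+1) (se.2+1) (List.replicate (se.2 - se.1).toNat lbl)
              (tl, pvSetSlice st.2 se.1 (se.2+1) (List.replicate (se.2 - se.1 + 1).toNat "[UNK]"))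
          ) st) := by
  funext st ent
  show (let parts := pvSplit ent " "; _) = (let parts := pvSplit ent " "; _)
  by_cases hlen : (pvSplit ent " ").length ≤ 2
  · rw [if_pos hlen, if_pos hlen]
  · rw [if_neg hlen, if_neg hlen]
    by_cases hc : pvSplit (PySem.Str.join " " ((pvSplit ent " ").drop 2)) "*" ≠ [""] ∧
        (pvSplit ent " ").getD 1 "" ∈ word2label.map Prod.fst
    · rw [if_pos hc]
      have hnot : ¬ (pvSplit (PySem.Str.join " " ((pvSplit ent " ").drop 2)) "*" = [""] ∨
          word2label.lookup ((pvSplit ent " ").getD 1 "") = none) := by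
        rcases hc with ⟨hne, hmem⟩
        rw [pv_mem_keys_iff_lookup] at hmem
        push_neg
        exact ⟨hne, Option.ne_none_iff_isSome.mpr hmem⟩
      rw [if_neg hnot]
      congr 1
      funext st2 ej
      exact pv_inner_step_eq english word2label ((pvSplit ent " ").getD 1 "") st2 ej
    · rw [if_neg hc]
      have hor : pvSplit (PySem.Str.join " " ((pvSplit ent " ").drop 2)) "*" = [""] ∨
          word2label.lookup ((pvSplit ent " ").getD 1 "") = none := by
        rcases not_and_or.mp hc with h | h
        · left; simpa using h
        · right
          rw [← Option.not_isSome_iff_eq_none]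
          rw [pv_mem_keys_iff_lookup] at h
          simpa using h
      rw [if_pos hor]

-- ===== VERDICT (by name: the statement is the Claim_ definition above) =====
theorem get_all_label_from_entities_spec : Claim_equal_get_all_label_from_entities := by
  intro english all_entities input_words word2label this_is_label _ _
  unfold Spec_get_all_label_from_entities get_all_label_from_entities get_all_label_from_entities_alt
  rw [pv_new_input_words, pv_outer_step_eq]
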